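-- pv_equiv track=rewrite | github.com/Lab00700/Algorithm | 프로그래머스/2/131127. 할인 행사/할인 행사.py | solution
-- ===== SOURCE A (Python) =====
-- def one_try(dic,i,discount,total):
--     c=0
--     while c!=10:
--         if discount[i] in dic and dic[discount[i]]!=0:
--             dic[discount[i]]-=1
--             total-=1
--         i+=1
--         c+=1
--     if not total:
--         return 1
--     return 0
--
-- def solution(want, number, discount):
--     dic={}
--     answer = 0
--     total=0
--     for i in range(len(want)):
--         dic[want[i]]=number[i]
--         total+=number[i]
--     for i in range(len(discount)-9):
--         answer+=one_try(dic.copy(),i,discount,total)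
--
--     return answer
-- ===== SOURCE B (Python) =====
-- def solution(want, number, discount):
--     need = dict(zip(want, number))
--     total = sum(number[:len(want)])
--     answer = 0
--     for i in range(len(discount) - 9):
--         window = discount[i:i+10]
--         if sum(min(v, window.count(k)) for k, v in need.items()) == total:
--             answer += 1
--     return answer
-- ===== Notes on version B (the rewrite author's own statement) =====
-- stated objective: alternative
-- what changed: B replaces A's per-window dict-copy-and-decrement simulation by a direct computation: it slices the 10-day window, counts each wanted item's occurrences, caps the purchase at the demand with min, and compares the bought sum with the total demand; Pre_ excludes inputs where A raises IndexError (want longer than number) and inputs with negative demand counts when a 10-day window exists, which are outside the task's natural domain and where A's decrement-past-zero behaviour is an implementation artefact.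
-- outside the precondition, e.g. on solution(['a'], [-1], ['a', 'a', 'a', 'a', 'a', 'a', 'a', 'a', 'a', 'a']): A returns 0, B returns 1
import Mathlib
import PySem

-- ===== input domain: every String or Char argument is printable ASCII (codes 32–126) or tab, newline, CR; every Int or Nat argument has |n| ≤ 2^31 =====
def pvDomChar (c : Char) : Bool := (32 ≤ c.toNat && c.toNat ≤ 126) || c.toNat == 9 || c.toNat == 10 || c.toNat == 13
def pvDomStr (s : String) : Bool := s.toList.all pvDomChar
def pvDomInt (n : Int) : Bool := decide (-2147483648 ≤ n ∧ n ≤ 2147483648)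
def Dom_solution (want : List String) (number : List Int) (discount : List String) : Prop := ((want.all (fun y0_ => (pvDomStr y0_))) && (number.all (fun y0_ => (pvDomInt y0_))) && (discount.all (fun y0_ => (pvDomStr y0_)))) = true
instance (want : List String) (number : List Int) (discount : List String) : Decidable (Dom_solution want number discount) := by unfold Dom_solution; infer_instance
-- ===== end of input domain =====

-- ===== PORT A =====
-- B computes each window's purchases directly from occurrence counts of the sliced
-- 10-day window (min of demand and count) instead of A's per-window
-- dict-copy-and-decrement simulation (objective: alternative).
-- helper of A: the body of one_try's while loop for one day `d` (dic/total as a pair)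
def oneTryBody (st : PySem.Dict String Int × Int) (d : String) : PySem.Dict String Int × Int :=
  if st.1.contains d && (st.1.getD d 0 != 0) then (st.1.insert d (st.1.getD d 0 - 1), st.2 - 1)
  else st

-- port of one_try(dic, i, discount, total)
def oneTry (dic : PySem.Dict String Int) (i : Int) (discount : List String) (total : Int) : Int :=
  let st := (PySem.List.pyRange 0 10 1).foldl
    (fun st c =>
      match PySem.List.pyGet? discount (i + c) with
      | some d => oneTryBody st d
      | none => st)   -- none = IndexError; never reached from `solution` (i + c < len discount)
    (dic, total)
  if st.2 = 0 then 1 else 0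

def solution (want : List String) (number : List Int) (discount : List String) : Int :=
  let st := (PySem.List.pyRange 0 (want.length : Int) 1).foldl
    (fun (st : PySem.Dict String Int × Int) i =>
      match PySem.List.pyGet? want i, PySem.List.pyGet? number i with
      | some w, some n => (st.1.insert w n, st.2 + n)
      | _, _ => st)   -- none = IndexError (number shorter than want); excluded by Pre_
    (PySem.Dict.empty, 0)
  (PySem.List.pyRange 0 ((discount.length : Int) - 9) 1).foldl
    (fun answer i => answer + oneTry st.1 i discount st.2) 0

-- ===== PORT B =====
def solution_alt (want : List String) (number : List Int) (discount : List String) : Int :=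
  let need := PySem.Dict.ofList (want.zip number)
  let total := (number.take want.length).sum
  (PySem.List.pyRange 0 ((discount.length : Int) - 9) 1).foldl
    (fun answer i =>
      let window := PySem.List.slice discount (some i) (some (i + 10))
      if (need.items.map (fun kv => min kv.2 ((window.count kv.1 : Int)))).sum = total
      then answer + 1 else answer)
    0

-- ===== PRECONDITION & SPEC =====
-- Pre_ excludes the inputs on which A raises IndexError (number shorter than want),
-- and inputs with a negative demand count among the used numbers when at least one
-- 10-day window exists — negative demands are outside the task's natural domain and
-- there A's decrement-past-zero behaviour is an implementation artefact (with fewer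
-- than 10 discount days no window is examined and both programs return 0).
def Pre_solution (want : List String) (number : List Int) (discount : List String) : Prop :=
  want.length ≤ number.length ∧
    (discount.length < 10 ∨ ∀ v ∈ number.take want.length, 0 ≤ v)
instance (want : List String) (number : List Int) (discount : List String) : Decidable (Pre_solution want number discount) := by unfold Pre_solution; infer_instance

def pvWitness_solution : List String × List Int × List String :=
  (["a", "b"], [2, 1], ["a", "c", "a", "b", "c", "a", "b", "a", "c", "b", "a"])

def Spec_solution (want : List String) (number : List Int) (discount : List String) (out : Int) : Prop := out = solution_alt want number discount
instance (want : List String) (number : List Int) (discount : List String) (out : Int) : Decidable (Spec_solution want number discount out) := by unfold Spec_solution; infer_instance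

-- ===== CLAIM (what is proved, stated in full; the proofs are below) =====
def Claim_equal_solution : Prop := ∀ (want : List String) (number : List Int) (discount : List String), Dom_solution want number discount → Pre_solution want number discount → Spec_solution want number discount (solution want number discount)

-- ===== LEMMAS AND PROOFS =====

-- what one window buys of one demand kv under A's decrement loop: all `c` occurrences,
-- capped at the demand when the demand is nonnegative and hit inside the window
def red (c v : Int) : Int := if 0 ≤ v ∧ v ≤ c then v else c

def redSum (ws : List String) (items : List (String × Int)) : Int :=
  (items.map (fun kv => red ((ws.count kv.1 : Int)) kv.2)).sum

-- on nonnegative demands A's reduction is exactly B's min of demand and count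
theorem redSum_eq_min (ws : List String) (items : List (String × Int))
    (h : ∀ kv ∈ items, 0 ≤ kv.2) :
    redSum ws items = (items.map (fun kv => min kv.2 ((ws.count kv.1 : Int)))).sum := by
  unfold redSum red
  congr 1
  apply List.map_congr_left
  intro kv hkv
  have := h kv hkv
  have : (0:Int) ≤ kv.2 := this
  rcases le_total kv.2 ((ws.count kv.1 : Int)) with hle | hle
  · rw [if_pos ⟨this, hle⟩, min_eq_left hle]
  · by_cases he : kv.2 = ((ws.count kv.1 : Int))
    · simp [he]
    · rw [if_neg (by omega), min_eq_right hle]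

theorem redSum_not_key (w : String) (ws : List String) (items : List (String × Int))
    (h : ∀ kv ∈ items, kv.1 ≠ w) : redSum (w :: ws) items = redSum ws items := by
  unfold redSum
  congr 1
  apply List.map_congr_left
  intro kv hkv
  rw [List.count_cons_of_ne (Ne.symm (by simpa using (h kv hkv)))]

theorem redSum_cons_zero (w : String) (ws : List String) (items : List (String × Int))
    (h : ∀ kv ∈ items, kv.1 = w → kv.2 = 0) : redSum (w :: ws) items = redSum ws items := by
  unfold redSum
  congr 1
  apply List.map_congr_left
  intro kv hkv
  by_cases hk : kv.1 = w
  · have := h kv hkv hk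
    have c1 : (0:Int) ≤ ((ws.count kv.1 : Int)) := by positivity
    have c2 : (0:Int) ≤ (((w :: ws).count kv.1 : Int)) := by positivity
    unfold red
    split_ifs <;> omega
  · rw [List.count_cons_of_ne (Ne.symm hk)]

theorem red_cons_of_ne_zero (c v : Int) (_hc : 0 ≤ c) (hv : v ≠ 0) :
    red (c + 1) v = 1 + red c (v - 1) := by
  unfold red
  split_ifs <;> omega

theorem redSum_insert (w : String) (v : Int) (ws : List String) (items : List (String × Int))
    (hnd : (items.map (·.1)).Nodup) (hw : (w, v) ∈ items) (hv : v ≠ 0) :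
    redSum (w :: ws) items
      = 1 + redSum ws (items.map (fun p => if p.1 == w then (w, v - 1) else p)) := by
  induction items with
  | nil => simp at hw
  | cons kv items ih =>
    simp only [List.map_cons, List.nodup_cons, List.mem_map] at hnd
    rcases List.mem_cons.1 hw with rfl | hw'
    · have htail : ∀ kv' ∈ items, kv'.1 ≠ w := by
        intro kv' h' he
        exact hnd.1 ⟨kv', h', he⟩
      have hmap : items.map (fun p => if p.1 == w then (w, v - 1) else p) = items := by
        apply List.map_congr_left ?_ |>.trans (List.map_id _)
        intro p hp
        simp [htail p hp]
      unfold redSum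
      simp only [List.map_cons, List.sum_cons, beq_self_eq_true, if_pos, List.count_cons_self]
      rw [hmap]
      have heq : redSum (w :: ws) items = redSum ws items := redSum_not_key w ws items htail
      unfold redSum at heq
      have c1 : (0:Int) ≤ ((ws.count w : Int)) := by positivity
      rw [show ((ws.count w + 1 : Nat) : Int) = ((ws.count w : Nat) : Int) + 1 by push_cast; ring,
          red_cons_of_ne_zero _ _ c1 hv]
      omega
    · have hk : kv.1 ≠ w := by
        intro he
        exact hnd.1 ⟨(w, v), hw', by simp [he]⟩
      unfold redSum
      simp only [List.map_cons, List.sum_cons]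
      rw [if_neg (by simpa using hk), List.count_cons_of_ne (Ne.symm hk)]
      have := ih hnd.2 hw'
      unfold redSum at this
      omega

-- loop invariant of one_try's while loop: the running total drops by exactly what the
-- processed days buy
theorem core_fold (ws : List String) (d : PySem.Dict String Int) (t : Int)
    (hnd : d.keys.Nodup) :
    (ws.foldl oneTryBody (d, t)).2 = t - redSum ws d.items := by
  induction ws generalizing d t with
  | nil =>
    simp only [List.foldl_nil]
    have : redSum [] d.items = 0 := by
      unfold redSum
      apply List.sum_eq_zero
      intro x hx
      obtain ⟨kv, hkv, rfl⟩ := List.mem_map.1 hx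
      unfold red
      simp only [List.count_nil, Nat.cast_zero]
      split_ifs <;> omega
    omega
  | cons w ws ih =>
    rw [List.foldl_cons]
    by_cases hc : d.contains w = true
    · have hsome : d.get? w = some (d.getD w 0) := by
        rw [PySem.Dict.contains_eq_isSome_get?] at hc
        cases hg : d.get? w with
        | none => simp [hg] at hc
        | some v => simp [PySem.Dict.getD_of_get?_eq_some d 0 hg]
      have hmem : (w, d.getD w 0) ∈ d.items := PySem.Dict.mem_items_of_get?_eq_some d hsome
      by_cases hz : d.getD w 0 = 0
      · have : oneTryBody (d, t) w = (d, t) := by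
          unfold oneTryBody
          simp [hz]
        rw [this, ih d t hnd,
          redSum_cons_zero w ws d.items (fun kv hkv hk => ?_)]
        subst hk
        rw [PySem.Dict.getD_of_mem_items d hkv hnd 0] at hz
        exact hz
      · have hstep : oneTryBody (d, t) w = (d.insert w (d.getD w 0 - 1), t - 1) := by
          unfold oneTryBody
          simp [hc, hz]
        rw [hstep, ih _ _ (PySem.Dict.nodup_keys_insert d w _ hnd)]
        rw [PySem.Dict.items_insert_of_contains d _ hc]
        rw [redSum_insert w (d.getD w 0) ws d.items hnd hmem hz]
        omega
    · have : oneTryBody (d, t) w = (d, t) := by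
        unfold oneTryBody
        simp [hc]
      rw [this, ih d t hnd, redSum_not_key w ws d.items (fun kv hkv hk => ?_)]
      have hwk : w ∈ d.keys := hk ▸ PySem.Dict.mem_keys_of_mem_items d hkv
      exact (by simpa [hc] using (PySem.Dict.contains_iff_mem_keys d w).2 hwk)

-- an index loop reading two parallel lists is a fold over their zip
theorem zip_fold {α β γ : Type} (l1 : List α) (l2 : List β) (d1 : α) (d2 : β)
    (g : γ → α → β → γ) (init : γ) (h : l1.length ≤ l2.length) :
    (List.range l1.length).foldl (fun st k => g st (l1.getD k d1) (l2.getD k d2)) init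
      = (l1.zip l2).foldl (fun st p => g st p.1 p.2) init := by
  induction l1 generalizing l2 init with
  | nil => simp
  | cons a l1 ih =>
    cases l2 with
    | nil => simp at h
    | cons b l2 =>
      rw [List.length_cons, List.range_succ_eq_map, List.foldl_cons, List.foldl_map]
      simp only [List.getD_cons_zero, List.getD_cons_succ]
      rw [ih l2 (g init a b) (by simpa using h)]
      simp [List.zip_cons_cons]

theorem map_snd_zip_take {α β : Type} (l1 : List α) (l2 : List β)
    (h : l1.length ≤ l2.length) : (l1.zip l2).map (·.2) = l2.take l1.length := by
  induction l1 generalizing l2 with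
  | nil => simp
  | cons a l1 ih =>
    cases l2 with
    | nil => simp at h
    | cons b l2 => simp [List.zip_cons_cons, ih l2 (by simpa using h)]

-- every value of a fold of inserts is either an initial value or an inserted one
theorem mem_values_foldl_insert {κ ν : Type} [BEq κ] [LawfulBEq κ] (l : List (κ × ν))
    (d : PySem.Dict κ ν) (p : κ × ν)
    (hp : p ∈ (l.foldl (fun d q => d.insert q.1 q.2) d).items) :
    p.2 ∈ d.values ∨ p.2 ∈ l.map (·.2) := by
  induction l generalizing d with
  | nil =>
    left
    exact List.mem_map.2 ⟨p, hp, rfl⟩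
  | cons q l ih =>
    rw [List.foldl_cons] at hp
    rcases ih (d.insert q.1 q.2) hp with hv | hv
    · rcases PySem.Dict.mem_values_insert d q.1 q.2 p.2 hv with he | hv'
      · right; simp [he]
      · left; exact hv'
    · right; simp [hv]

-- A's dict/total-building loop computes (fold of inserts over the zip, sum of used numbers)
theorem build_fold (want : List String) (number : List Int)
    (h : want.length ≤ number.length) :
    (PySem.List.pyRange 0 (want.length : Int) 1).foldl
      (fun (st : PySem.Dict String Int × Int) i =>
        match PySem.List.pyGet? want i, PySem.List.pyGet? number i with
        | some w, some n => (st.1.insert w n, st.2 + n)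
        | _, _ => st)
      (PySem.Dict.empty, 0)
    = ((want.zip number).foldl (fun d p => d.insert p.1 p.2) PySem.Dict.empty,
       ((want.zip number).map (·.2)).sum) := by
  rw [PySem.List.pyRange_zero_natCast, List.foldl_map]
  refine (PySem.List.foldl_congr_mem (List.range want.length) _
      (fun (st : PySem.Dict String Int × Int) (k : Nat) =>
        (st.1.insert (want.getD k "") (number.getD k 0), st.2 + number.getD k 0)) _ ?_).trans ?_
  · intro acc k hk
    rw [List.mem_range] at hk
    have hk2 : k < number.length := lt_of_lt_of_le hk h
    rw [PySem.List.pyGet?_natCast, PySem.List.pyGet?_natCast,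
        List.getElem?_eq_getElem hk, List.getElem?_eq_getElem hk2]
    simp [List.getD_eq_getElem?_getD, hk, hk2]
  · rw [zip_fold want number "" 0
        (fun st w n => (st.1.insert w n, st.2 + n)) (PySem.Dict.empty, 0) h]
    rw [PySem.List.foldl_prod_mk (f := fun (d : PySem.Dict String Int) (p : String × Int) => d.insert p.1 p.2)
        (g := fun (t : Int) (p : String × Int) => t + p.2)]
    rw [PySem.List.foldl_add (want.zip number) (fun p : String × Int => p.2) 0]
    simp

-- one_try's index loop over ten days is a fold over the sliced window
theorem window_fold (discount : List String) (i : Int) (n : Nat)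
    (h0 : 0 ≤ i) (h : i + n ≤ (discount.length : Int)) (st0 : PySem.Dict String Int × Int) :
    (PySem.List.pyRange 0 (n : Int) 1).foldl
      (fun st c =>
        match PySem.List.pyGet? discount (i + c) with
        | some d => oneTryBody st d
        | none => st) st0
    = (PySem.List.slice discount (some i) (some (i + n))).foldl oneTryBody st0 := by
  induction n with
  | zero =>
    obtain ⟨j, rfl⟩ := Int.eq_ofNat_of_zero_le h0
    rw [PySem.List.slice_natCast_add discount j 0]
    simp
  | succ n ih =>
    have hb : i + n ≤ (discount.length : Int) := by push_cast at h; omega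
    have hlt : i + n < (discount.length : Int) := by push_cast at h ⊢; omega
    rw [show ((n + 1 : Nat) : Int) = (n : Int) + 1 by push_cast; ring,
        PySem.List.pyRange_one_succ_right (by positivity), List.foldl_append, ih hb]
    obtain ⟨j, rfl⟩ := Int.eq_ofNat_of_zero_le h0
    rw [show ((j:Int) + ((n:Int) + 1)) = ((j:Int) + ((n+1 : Nat):Int)) by push_cast; ring]
    rw [PySem.List.slice_natCast_add discount j (n+1), PySem.List.slice_natCast_add discount j n]
    have hjn : j + n < discount.length := by exact_mod_cast hlt
    rw [List.take_add_one, List.foldl_append]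
    simp only [List.foldl_cons, List.foldl_nil]
    have hget : PySem.List.pyGet? discount ((j:Int) + (n:Int)) = some discount[j + n] := by
      rw [show ((j:Int) + (n:Int)) = ((j + n : Nat) : Int) by push_cast; ring]
      rw [PySem.List.pyGet?_natCast]
      simp [hjn]
    rw [hget]
    have : (List.drop j discount)[n]? = some discount[j+n] := by
      rw [List.getElem?_drop]
      simp [hjn]
    simp [this]

-- ===== VERDICT (by name: the statement is the Claim_ definition above) =====
theorem solution_spec : Claim_equal_solution := by
  intro want number discount _ hpre
  obtain ⟨h1, hcase⟩ := hpre
  rcases hcase with hshort | hnn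
  · have hnil : PySem.List.pyRange 0 ((discount.length : Int) - 9) 1 = [] := by
      apply List.eq_nil_iff_forall_not_mem.2
      intro x hx
      rw [PySem.List.mem_pyRange_one] at hx
      omega
    unfold Spec_solution solution solution_alt
    simp [hnil]
  unfold Spec_solution solution solution_alt
  rw [build_fold want number h1]
  have hDk : ((want.zip number).foldl (fun d p => d.insert p.1 p.2) PySem.Dict.empty).keys.Nodup := by
    have := PySem.Dict.nodup_keys_foldl_insert_key (want.zip number) (·.1)
      (fun _ p => p.2) PySem.Dict.empty (by simp)
    simpa using this
  have hvals : ∀ kv ∈ ((want.zip number).foldl (fun d p => d.insert p.1 p.2) PySem.Dict.empty).items,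
      (0:Int) ≤ kv.2 := by
    intro kv hkv
    rcases mem_values_foldl_insert (want.zip number) PySem.Dict.empty kv hkv with hv | hv
    · simp [PySem.Dict.values, PySem.Dict.empty] at hv
    · rw [map_snd_zip_take want number h1] at hv
      exact hnn _ hv
  have hT : ((want.zip number).map (·.2)).sum = (number.take want.length).sum := by
    rw [map_snd_zip_take want number h1]
  apply PySem.List.foldl_congr_mem
  intro ans i hi
  rw [PySem.List.mem_pyRange_one] at hi
  have h10 : i + ((10:Nat):Int) ≤ (discount.length : Int) := by push_cast; omega
  unfold oneTry
  dsimp only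
  rw [show (10:Int) = ((10:Nat):Int) by norm_num, window_fold discount i 10 hi.1 h10,
      core_fold _ _ _ hDk]
  rw [show ((10:Nat):Int) = (10:Int) by norm_num] at *
  have hneed : PySem.Dict.ofList (want.zip number)
      = (want.zip number).foldl (fun d p => d.insert p.1 p.2) PySem.Dict.empty := rfl
  rw [hneed]
  rw [← redSum_eq_min (PySem.List.slice discount (some i) (some (i + 10))) _ hvals, ← hT]
  by_cases hz : redSum (PySem.List.slice discount (some i) (some (i + 10)))
      ((want.zip number).foldl (fun d p => d.insert p.1 p.2) PySem.Dict.empty).items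
      = ((want.zip number).map (·.2)).sum
  · rw [if_pos (by omega), if_pos hz]
  · rw [if_neg (by omega), if_neg hz]
    omega
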